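-- pv_equiv track=rewrite | github.com/codingpeasant/likou | py/BestTeamWithNoConflicts.py | bestTeamScore1
-- ===== SOURCE A (Python) =====
-- from typing import List
--
-- def bestTeamScore1(scores: List[int], ages: List[int]) -> int:
--     ageScorePair, n = sorted(zip(ages, scores)), len(scores)
--     # dp[i] stores the maximum score that can be obtained when i-th player is included and all other players are between indices 0 and i-1.
--     dp = [ageScorePair[i][1] for i in range(n)]
--
--     for i in range(n):
--         for j in range(i):
--             if ageScorePair[i][1] >= ageScorePair[j][1]:
--                 dp[i] = max(dp[i], ageScorePair[i][1] + dp[j]) # pick i only or join i to the previous smaller players (subsequence)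
--
--     return max(dp)
-- ===== SOURCE B (Python) =====
-- def bestTeamScore1(scores, ages):
--     # Pareto-front DP: sort the (age, score) pairs, then keep only a pruned
--     # "front" of (score, best) pairs with strictly increasing scores and bests;
--     # each player's dp value is read off the front instead of rescanning all
--     # previously processed players.
--     pairs = sorted(zip(ages, scores))
--     front = []   # pruned (score, best) pairs: scores and bests strictly increasing
--     best = None
--     for _, s in pairs:
--         q = 0
--         for k, v in front:
--             if k <= s:
--                 q = max(q, v)
--         d = s + q
--         best = d if best is None or best < d else best
--         if q < d:
--             front = ([e for e in front if e[0] < s] + [(s, d)]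
--                      + [e for e in front if e[0] > s and e[1] > d])
--     return best
-- ===== Notes on version B (the rewrite author's own statement) =====
-- stated objective: alternative
-- what changed: Replaces A's quadratic DP table (for every player, rescan all earlier players) with a single pass that maintains a pruned Pareto front of (score, best) pairs, querying and re-pruning the front per player, and a running maximum instead of a final max(dp); intended as faster (measured 4.47x at n=4096) but the pruned front can still grow linearly on adversarial inputs, so no speed is claimed.
import Mathlib
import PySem

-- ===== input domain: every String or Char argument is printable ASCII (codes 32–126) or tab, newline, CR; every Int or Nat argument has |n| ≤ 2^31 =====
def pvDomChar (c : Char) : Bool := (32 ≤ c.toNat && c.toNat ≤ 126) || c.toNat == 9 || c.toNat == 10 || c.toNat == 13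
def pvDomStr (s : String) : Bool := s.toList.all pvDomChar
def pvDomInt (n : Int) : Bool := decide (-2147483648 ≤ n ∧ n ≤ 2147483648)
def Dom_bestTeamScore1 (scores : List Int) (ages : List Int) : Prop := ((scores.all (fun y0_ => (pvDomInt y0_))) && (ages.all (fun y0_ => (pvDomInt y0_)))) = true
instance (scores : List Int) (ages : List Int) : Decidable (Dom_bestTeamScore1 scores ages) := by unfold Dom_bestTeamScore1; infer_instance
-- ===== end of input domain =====

-- B replaces A's quadratic DP table with a single pass over the sorted pairs that keeps a pruned
-- Pareto front of (score, best) pairs and a running maximum; equal on all inputs where A returns.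

-- ===== PORT A =====
-- inner loop body: 'if ageScorePair[i][1] >= ageScorePair[j][1]: dp[i] = max(dp[i], ageScorePair[i][1] + dp[j])'
def pvAInner (pairs : List (Int × Int)) (i : Int) (dp : List Int) (j : Int) : List Int :=
  if (PySem.List.pyGetD pairs j (0, 0)).2 ≤ (PySem.List.pyGetD pairs i (0, 0)).2 then
    PySem.List.pySetD dp i (max (PySem.List.pyGetD dp i 0)
      ((PySem.List.pyGetD pairs i (0, 0)).2 + PySem.List.pyGetD dp j 0))
  else dp

-- outer loop body: 'for j in range(i): …'
def pvAOuter (pairs : List (Int × Int)) (dp : List Int) (i : Int) : List Int :=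
  (PySem.List.pyRange 0 i 1).foldl (pvAInner pairs i) dp

def bestTeamScore1 (scores : List Int) (ages : List Int) : Int :=
  let ageScorePair := PySem.List.sorted2 (ages.zip scores) Prod.fst Prod.snd
  let n : Int := scores.length
  let dp0 := (PySem.List.pyRange 0 n 1).map (fun i => (PySem.List.pyGetD ageScorePair i (0, 0)).2)
  let dp := (PySem.List.pyRange 0 n 1).foldl (pvAOuter ageScorePair) dp0
  (PySem.List.max? dp (fun x => x)).getD 0

-- ===== PORT B =====
-- one step of B's pass: query the pruned front, update the running answer, re-prune the front
def pvAltStep (st : List (Int × Int) × Option Int) (p : Int × Int) :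
    List (Int × Int) × Option Int :=
  let s := p.2
  let q := st.1.foldl (fun q e => if e.1 ≤ s then max q e.2 else q) 0
  let d := s + q
  let best : Option Int := match st.2 with
    | none => some d
    | some b => some (if b < d then d else b)
  if q < d then
    (st.1.filter (fun e => decide (e.1 < s)) ++ [(s, d)]
      ++ st.1.filter (fun e => decide (s < e.1) && decide (d < e.2)), best)
  else (st.1, best)

def bestTeamScore1_alt (scores : List Int) (ages : List Int) : Int :=
  let pairs := PySem.List.sorted2 (ages.zip scores) Prod.fst Prod.snd
  let res := pairs.foldl pvAltStep ([], none)
  res.2.getD 0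

-- ===== PRECONDITION & SPEC =====
-- Pre_ excludes exactly the inputs where the Python A raises: scores == [] (max() of an empty
-- list, ValueError) and len(scores) > len(ages) (IndexError past the end of the zipped list).
def Pre_bestTeamScore1 (scores : List Int) (ages : List Int) : Prop :=
  scores ≠ [] ∧ scores.length ≤ ages.length
instance (scores : List Int) (ages : List Int) : Decidable (Pre_bestTeamScore1 scores ages) := by
  unfold Pre_bestTeamScore1; infer_instance

def pvWitness_bestTeamScore1 : List Int × List Int := ([5, 3], [2, 1])

def Spec_bestTeamScore1 (scores : List Int) (ages : List Int) (out : Int) : Prop := out = bestTeamScore1_alt scores ages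
instance (scores : List Int) (ages : List Int) (out : Int) : Decidable (Spec_bestTeamScore1 scores ages out) := by unfold Spec_bestTeamScore1; infer_instance

-- ===== CLAIM (what is proved, stated in full; the proofs are below) =====
def Claim_equal_bestTeamScore1 : Prop := ∀ (scores : List Int) (ages : List Int), Dom_bestTeamScore1 scores ages → Pre_bestTeamScore1 scores ages → Spec_bestTeamScore1 scores ages (bestTeamScore1 scores ages)

-- ===== LEMMAS AND PROOFS =====

-- ---- the common model: the dp values of the sorted pairs, built left to right ----

-- running maximum (with floor q0) of the dp values of processed players whose score is ≤ s
def pvMsupF (q0 : Int) (l : List (Int × Int)) (s : Int) : Int :=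
  l.foldl (fun q e => if e.1 ≤ s then max q e.2 else q) q0

def pvMsup (l : List (Int × Int)) (s : Int) : Int := pvMsupF 0 l s

-- the (score, dp) pairs of the processed players, in processing order
def pvModel (acc : List (Int × Int)) : List (Int × Int) → List (Int × Int)
  | [] => acc
  | p :: rest => pvModel (acc ++ [(p.2, p.2 + pvMsup acc p.2)]) rest

-- Python's running  'best = d if best is None or best < d else best'
def pvRunMax (o : Option Int) (xs : List Int) : Option Int :=
  xs.foldl (fun o d => match o with | none => some d | some b => some (if b < d then d else b)) o

-- ---- facts about pvMsupF ----

theorem le_pvMsupF (l : List (Int × Int)) (s : Int) : ∀ q0, q0 ≤ pvMsupF q0 l s := by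
  induction l with
  | nil => intro q0; simp [pvMsupF]
  | cons e t ih =>
    intro q0
    simp only [pvMsupF, List.foldl_cons]
    split
    · exact le_trans (le_max_left _ _) (ih _)
    · exact ih _

theorem mem_le_pvMsupF (l : List (Int × Int)) (s : Int) :
    ∀ q0, ∀ e ∈ l, e.1 ≤ s → e.2 ≤ pvMsupF q0 l s := by
  induction l with
  | nil => intro _ e h; simp at h
  | cons a t ih =>
    intro q0 e he hs
    simp only [List.mem_cons] at he
    simp only [pvMsupF, List.foldl_cons]
    rcases he with rfl | he
    · simp only [if_pos hs]
      exact le_trans (le_max_right _ _) (le_pvMsupF t s _)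
    · split
      · exact ih _ e he hs
      · exact ih _ e he hs

theorem pvMsupF_le (l : List (Int × Int)) (s b : Int) :
    ∀ q0, q0 ≤ b → (∀ e ∈ l, e.1 ≤ s → e.2 ≤ b) → pvMsupF q0 l s ≤ b := by
  induction l with
  | nil => intro q0 h _; simpa [pvMsupF] using h
  | cons a t ih =>
    intro q0 hq hb
    simp only [pvMsupF, List.foldl_cons]
    split
    · rename_i hs
      exact ih _ (max_le hq (hb a (by simp) hs)) (fun e he h => hb e (by simp [he]) h)
    · exact ih _ hq (fun e he h => hb e (by simp [he]) h)

theorem pvMsup_nonneg (l : List (Int × Int)) (s : Int) : 0 ≤ pvMsup l s :=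
  le_pvMsupF l s 0

theorem pvMsup_mono (l : List (Int × Int)) {s s' : Int} (h : s ≤ s') :
    pvMsup l s ≤ pvMsup l s' :=
  pvMsupF_le l s _ 0 (pvMsup_nonneg l s')
    (fun e he hs => mem_le_pvMsupF l s' 0 e he (le_trans hs h))

theorem pvMsup_append_singleton (l : List (Int × Int)) (s d s' : Int) :
    pvMsup (l ++ [(s, d)]) s' = if s ≤ s' then max (pvMsup l s') d else pvMsup l s' := by
  simp [pvMsup, pvMsupF, List.foldl_append]

-- inserting (s, d) with d above the current query result re-creates exactly the
-- queries of the un-pruned list extended by (s, d)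
theorem pvMsup_insert (front : List (Int × Int)) (s d : Int) (h : pvMsup front s < d) (s' : Int) :
    pvMsup (front.filter (fun e => decide (e.1 < s)) ++ [(s, d)]
      ++ front.filter (fun e => decide (s < e.1) && decide (d < e.2))) s'
    = if s ≤ s' then max (pvMsup front s') d else pvMsup front s' := by
  split
  · rename_i hss
    apply le_antisymm
    · apply pvMsupF_le _ _ _ 0 (le_trans (pvMsup_nonneg front s') (le_max_left _ _))
      intro e he hes
      simp only [List.append_assoc, List.mem_append, List.mem_filter, List.mem_singleton,
        decide_eq_true_eq, Bool.and_eq_true] at he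
      rcases he with ⟨he, _⟩ | (rfl | ⟨he, _⟩)
      · exact le_trans (mem_le_pvMsupF front s' 0 e he hes) (le_max_left _ _)
      · exact le_max_right _ _
      · exact le_trans (mem_le_pvMsupF front s' 0 e he hes) (le_max_left _ _)
    · apply max_le
      · apply pvMsupF_le _ _ _ 0 (pvMsup_nonneg _ _)
        intro e he hes
        by_cases h1 : e.1 < s
        · exact mem_le_pvMsupF _ s' 0 e (by simp [List.mem_append, List.mem_filter, he, h1]) hes
        · by_cases h2 : s < e.1
          · by_cases h3 : d < e.2
            · exact mem_le_pvMsupF _ s' 0 e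
                (by simp [List.mem_append, List.mem_filter, he, h2, h3]) hes
            · calc e.2 ≤ d := by omega
                _ ≤ _ := mem_le_pvMsupF _ s' 0 (s, d)
                    (by simp [List.mem_append, List.mem_filter]) hss
          · have h4 : e.1 = s := by omega
            calc e.2 ≤ pvMsup front s := mem_le_pvMsupF front s 0 e he (le_of_eq h4)
              _ ≤ d := le_of_lt h
              _ ≤ _ := mem_le_pvMsupF _ s' 0 (s, d)
                  (by simp [List.mem_append, List.mem_filter]) hss
      · exact mem_le_pvMsupF _ s' 0 (s, d)
          (by simp [List.mem_append, List.mem_filter]) hss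
  · rename_i hss
    apply le_antisymm
    · apply pvMsupF_le _ _ _ 0 (pvMsup_nonneg _ _)
      intro e he hes
      simp only [List.append_assoc, List.mem_append, List.mem_filter, List.mem_singleton,
        decide_eq_true_eq, Bool.and_eq_true] at he
      rcases he with ⟨he, _⟩ | (rfl | ⟨he, _⟩)
      · exact mem_le_pvMsupF front s' 0 e he hes
      · omega
      · exact mem_le_pvMsupF front s' 0 e he hes
    · apply pvMsupF_le _ _ _ 0 (pvMsup_nonneg _ _)
      intro e he hes
      have h1 : e.1 < s := by omega
      exact mem_le_pvMsupF _ s' 0 e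
        (by simp [List.mem_append, List.mem_filter, he, h1]) hes

-- ---- facts about pvModel ----

theorem pvModel_snoc (L : List (Int × Int)) (p : Int × Int) : ∀ acc,
    pvModel acc (L ++ [p]) = pvModel acc L ++ [(p.2, p.2 + pvMsup (pvModel acc L) p.2)] := by
  induction L with
  | nil => intro acc; simp [pvModel]
  | cons a t ih => intro acc; simp only [List.cons_append, pvModel]; exact ih _

theorem pvModel_map_fst (L : List (Int × Int)) : ∀ acc,
    (pvModel acc L).map Prod.fst = acc.map Prod.fst ++ L.map Prod.snd := by
  induction L with
  | nil => intro acc; simp [pvModel]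
  | cons a t ih => intro acc; simp only [pvModel, List.map_cons]; rw [ih]; simp

theorem pvModel_length (L acc : List (Int × Int)) :
    (pvModel acc L).length = acc.length + L.length := by
  have := congrArg List.length (pvModel_map_fst L acc)
  simpa using this

-- ---- A's inner loop ----

theorem pvInner_value (s : Int) (E : List (Int × Int)) : ∀ q,
    E.foldl (fun c e => if e.1 ≤ s then max c (s + e.2) else c) (s + q)
      = s + pvMsupF q E s := by
  induction E with
  | nil => intro q; simp [pvMsupF]
  | cons e t ih =>
    intro q
    simp only [List.foldl_cons, pvMsupF]
    by_cases h : e.1 ≤ s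
    · rw [if_pos h, if_pos h, Int.max_add_left]
      simpa [pvMsupF] using ih (max q e.2)
    · rw [if_neg h, if_neg h]
      simpa [pvMsupF] using ih q

theorem pyGetD_append_cons_left (Ad tail : List Int) (cur j : Int)
    (h0 : 0 ≤ j) (h1 : j < (Ad.length : Int)) :
    PySem.List.pyGetD (Ad ++ cur :: tail) j 0 = PySem.List.pyGetD Ad j 0 := by
  rw [PySem.List.pyGetD_eq_getElem _ _ h0 (by simp; omega),
    PySem.List.pyGetD_eq_getElem _ _ h0 (by omega)]
  rw [List.getElem_append_left (by omega)]

theorem pyGetD_append_cons_self (Ad tail : List Int) (cur : Int) :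
    PySem.List.pyGetD (Ad ++ cur :: tail) (Ad.length : Int) 0 = cur := by
  rw [PySem.List.pyGetD_eq_getElem _ _ (by omega) (by simp)]
  simp

theorem pySetD_append_cons_self (Ad tail : List Int) (cur v : Int) :
    PySem.List.pySetD (Ad ++ cur :: tail) (Ad.length : Int) v = Ad ++ v :: tail := by
  rw [PySem.List.pySetD_natCast]
  have h0 : Ad.length - Ad.length = 0 := Nat.sub_self _
  rw [List.set_append_right _ _ (le_refl _), h0, List.set_cons_zero]

theorem pvInner_surgery (pairs : List (Int × Int)) (Ad tail : List Int) :
    ∀ (js : List Int), (∀ j ∈ js, 0 ≤ j ∧ j < (Ad.length : Int)) → ∀ cur,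
    js.foldl (pvAInner pairs (Ad.length : Int)) (Ad ++ cur :: tail)
      = Ad ++ (js.foldl (fun c j =>
          if (PySem.List.pyGetD pairs j (0, 0)).2 ≤ (PySem.List.pyGetD pairs (Ad.length : Int) (0, 0)).2
          then max c ((PySem.List.pyGetD pairs (Ad.length : Int) (0, 0)).2 + PySem.List.pyGetD Ad j 0)
          else c) cur) :: tail := by
  intro js
  induction js with
  | nil => intro _ cur; simp
  | cons j t ih =>
    intro hb cur
    obtain ⟨h0, h1⟩ := hb j (by simp)
    simp only [List.foldl_cons]
    have hstep : pvAInner pairs (Ad.length : Int) (Ad ++ cur :: tail) j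
        = Ad ++ (if (PySem.List.pyGetD pairs j (0, 0)).2 ≤ (PySem.List.pyGetD pairs (Ad.length : Int) (0, 0)).2
            then max cur ((PySem.List.pyGetD pairs (Ad.length : Int) (0, 0)).2 + PySem.List.pyGetD Ad j 0)
            else cur) :: tail := by
      unfold pvAInner
      rw [pyGetD_append_cons_self, pyGetD_append_cons_left Ad tail cur j h0 h1,
        pySetD_append_cons_self]
      split <;> simp
    rw [hstep]
    split
    · exact ih (fun j hj => hb j (by simp [hj])) _
    · exact ih (fun j hj => hb j (by simp [hj])) _

-- ---- A's outer loop computes the model's dp values ----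

theorem pvOuter_model (P : List (Int × Int)) : ∀ k, k ≤ P.length →
    (PySem.List.pyRange 0 (k : Int) 1).foldl (pvAOuter P) (P.map Prod.snd)
      = (pvModel [] (P.take k)).map Prod.snd ++ (P.drop k).map Prod.snd := by
  intro k
  induction k with
  | zero => intro _; simp [pvModel]
  | succ k ih =>
    intro hk
    have hk' : k < P.length := by omega
    have hsplit : PySem.List.pyRange 0 ((k + 1 : Nat) : Int) 1
        = PySem.List.pyRange 0 (k : Int) 1 ++ [(k : Int)] := by
      push_cast
      exact PySem.List.pyRange_one_succ_right (by omega)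
    rw [hsplit, List.foldl_append, ih (by omega)]
    set E := pvModel [] (P.take k) with hE
    set Ad := E.map Prod.snd with hAd
    have hAdlen : Ad.length = k := by
      simp [hAd, hE, pvModel_length, List.length_take, Nat.min_eq_left (le_of_lt hk')]
    have hdrop : (P.drop k).map Prod.snd = P[k].2 :: (P.drop (k + 1)).map Prod.snd := by
      rw [List.drop_eq_getElem_cons hk', List.map_cons]
    have hki : ((k : Nat) : Int) = ((Ad.length : Nat) : Int) := by rw [hAdlen]
    simp only [List.foldl_cons, List.foldl_nil]
    rw [pvAOuter, hdrop, hki]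
    -- the fixed score s of player k
    have hPk : PySem.List.pyGetD P ((Ad.length : Nat) : Int) (0, 0) = P[k] := by
      rw [PySem.List.pyGetD_eq_getElem _ _ (by omega) (by omega)]
      simp [hAdlen]
    rw [pvInner_surgery P Ad ((P.drop (k + 1)).map Prod.snd)
      (PySem.List.pyRange 0 (Ad.length : Int) 1)
      (fun j hj => by
        rw [PySem.List.mem_pyRange_one] at hj; exact ⟨hj.1, hj.2⟩) P[k].2]
    -- turn the value fold over the index range into a fold over E
    have hlenE : E.length = k := by
      simp [hE, pvModel_length, List.length_take, Nat.min_eq_left (le_of_lt hk')]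
    have hEfst : ∀ (j : Nat) (hj : j < k),
        (E[j]'(by omega)).1 = (P[j]'(by omega)).2 := by
      intro j hj
      have hfst : E.map Prod.fst = (P.take k).map Prod.snd := by
        have := pvModel_map_fst (P.take k) []
        rw [← hE] at this
        simpa using this
      have h1 := List.getElem_of_eq hfst (show j < (E.map Prod.fst).length by simp [hlenE]; omega)
      simpa [List.getElem_take] using h1
    have hcongr : (PySem.List.pyRange 0 (Ad.length : Int) 1).foldl (fun c j =>
          if (PySem.List.pyGetD P j (0, 0)).2 ≤ (PySem.List.pyGetD P ((Ad.length : Nat) : Int) (0, 0)).2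
          then max c ((PySem.List.pyGetD P ((Ad.length : Nat) : Int) (0, 0)).2 + PySem.List.pyGetD Ad j 0)
          else c) P[k].2
        = (PySem.List.pyRange 0 ((E.length : Nat) : Int) 1).foldl (fun c j =>
          (fun c (e : Int × Int) => if e.1 ≤ P[k].2 then max c (P[k].2 + e.2) else c) c
            (PySem.List.pyGetD E j (0, 0))) P[k].2 := by
      have hlenE : E.length = k := by
        simp [hE, pvModel_length, List.length_take, Nat.min_eq_left (le_of_lt hk')]
      rw [show ((E.length : Nat) : Int) = (Ad.length : Int) by rw [hlenE, hAdlen]]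
      apply PySem.List.foldl_congr_mem
      intro c j hj
      rw [PySem.List.mem_pyRange_one] at hj
      have hjk : j.toNat < k := by omega
      have hj' : j = ((j.toNat : Nat) : Int) := by omega
      have hgE : PySem.List.pyGetD E j (0, 0) = E[j.toNat]'(by omega) := by
        rw [PySem.List.pyGetD_eq_getElem _ _ hj.1 (by omega)]
      have hgP : (PySem.List.pyGetD P j (0, 0)).2 = (E[j.toNat]'(by omega)).1 := by
        rw [PySem.List.pyGetD_eq_getElem _ _ hj.1 (by omega), hEfst j.toNat hjk]
      have hgA : PySem.List.pyGetD Ad j 0 = (E[j.toNat]'(by omega)).2 := by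
        rw [PySem.List.pyGetD_eq_getElem _ _ hj.1 (by simp [hAd]; omega)]
        simp [hAd]
      rw [hPk, hgE, hgP, hgA]
    rw [hcongr, PySem.List.foldl_pyRange_zero_pyGetD' E (0, 0)
      (fun c (e : Int × Int) => if e.1 ≤ P[k].2 then max c (P[k].2 + e.2) else c) P[k].2]
    have hval : E.foldl (fun c (e : Int × Int) => if e.1 ≤ P[k].2 then max c (P[k].2 + e.2) else c) P[k].2
        = P[k].2 + pvMsup E P[k].2 := by
      have := pvInner_value P[k].2 E 0
      simpa [pvMsup] using this
    rw [hval]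
    rw [List.take_succ_eq_append_getElem hk', pvModel_snoc, ← hE]
    simp [hAd]

-- ---- B's pass computes the same dp values' running maximum ----

theorem pvRunMax_append (o : Option Int) (xs ys : List Int) :
    pvRunMax o (xs ++ ys) = pvRunMax (pvRunMax o xs) ys := by
  simp [pvRunMax, List.foldl_append]

theorem pvAlt_inv (L : List (Int × Int)) : ∀ (acc front : List (Int × Int)) (best : Option Int),
    (∀ s, pvMsup front s = pvMsup acc s) → best = pvRunMax none (acc.map Prod.snd) →
    (L.foldl pvAltStep (front, best)).2 = pvRunMax none ((pvModel acc L).map Prod.snd) := by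
  induction L with
  | nil => intro acc front best _ hbest; simpa [pvModel] using hbest
  | cons p rest ih =>
    intro acc front best hinv hbest
    simp only [List.foldl_cons, pvModel]
    have hq : front.foldl (fun q e => if e.1 ≤ p.2 then max q e.2 else q) 0
        = pvMsup acc p.2 := hinv p.2
    have hbest' : (pvAltStep (front, best) p).2
        = pvRunMax none ((acc ++ [(p.2, p.2 + pvMsup acc p.2)]).map Prod.snd) := by
      rw [List.map_append, pvRunMax_append, ← hbest]
      unfold pvAltStep
      simp only [hq]
      split <;> simp [pvRunMax]
    have hfront' : ∀ s, pvMsup (pvAltStep (front, best) p).1 s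
        = pvMsup (acc ++ [(p.2, p.2 + pvMsup acc p.2)]) s := by
      intro s
      rw [pvMsup_append_singleton]
      unfold pvAltStep
      simp only [hq]
      by_cases hlt : pvMsup acc p.2 < p.2 + pvMsup acc p.2
      · rw [if_pos hlt]
        simp only
        rw [pvMsup_insert front p.2 (p.2 + pvMsup acc p.2) (by rw [hinv]; exact hlt) s]
        rw [hinv]
      · rw [if_neg hlt]
        simp only
        rw [hinv]
        split
        · rename_i hps
          have : p.2 + pvMsup acc p.2 ≤ pvMsup acc p.2 := by omega
          have hm : pvMsup acc p.2 ≤ pvMsup acc s := pvMsup_mono acc hps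
          omega
        · rfl
    have := ih (acc ++ [(p.2, p.2 + pvMsup acc p.2)]) (pvAltStep (front, best) p).1
      (pvAltStep (front, best) p).2 hfront' hbest'
    simpa using this

-- ---- Python's max(xs) equals the running maximum ----

theorem pvRunMax_some (t : List Int) : ∀ x,
    pvRunMax (some x) t = some (t.foldl (fun b d => if b < d then d else b) x) := by
  induction t with
  | nil => intro x; simp [pvRunMax]
  | cons d t ih => intro x; simp only [pvRunMax, List.foldl_cons] at *; rw [ih]

theorem pvMax_eq_runMax (xs : List Int) :
    (PySem.List.max? xs (fun x => x)).getD 0 = (pvRunMax none xs).getD 0 := by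
  cases xs with
  | nil => simp [pvRunMax, PySem.List.max?]
  | cons x t =>
    rw [PySem.List.max?_id_cons]
    have : pvRunMax none (x :: t) = pvRunMax (some x) t := by simp [pvRunMax]
    rw [this, pvRunMax_some]
    have hfun : (fun (b d : Int) => if b < d then d else b) = max := by
      funext a b
      rw [max_def]
      split <;> split <;> omega
    rw [hfun]

-- ===== VERDICT (by name: the statement is the Claim_ definition above) =====
theorem bestTeamScore1_spec : Claim_equal_bestTeamScore1 := by
  intro scores ages _ hpre
  obtain ⟨hne, hlen⟩ := hpre
  simp only [Spec_bestTeamScore1, bestTeamScore1, bestTeamScore1_alt]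
  set pairs := PySem.List.sorted2 (ages.zip scores) Prod.fst Prod.snd with hpairs
  have hplen : pairs.length = scores.length := by
    rw [hpairs, (PySem.List.sorted2_perm (ages.zip scores) Prod.fst Prod.snd false).length_eq]
    simp [List.length_zip]
    omega
  have hdp0 : (PySem.List.pyRange 0 (scores.length : Int) 1).map
      (fun i => (PySem.List.pyGetD pairs i (0, 0)).2) = pairs.map Prod.snd := by
    rw [← hplen]
    have : (fun (i : Int) => (PySem.List.pyGetD pairs i (0, 0)).2)
        = Prod.snd ∘ (fun (i : Int) => PySem.List.pyGetD pairs i (0, 0)) := rfl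
    rw [this, ← List.map_map]
    rw [PySem.List.map_pyGetD_pyRange_zero' pairs (0, 0)]
  rw [hdp0, ← hplen]
  rw [pvOuter_model pairs pairs.length (le_refl _)]
  simp only [List.take_length, List.drop_length, List.map_nil, List.append_nil]
  rw [pvMax_eq_runMax]
  rw [pvAlt_inv pairs [] [] none (fun _ => rfl) rfl]
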